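-- pv_equiv track=rewrite | github.com/TanelPaal/Programming-Introductory-Course | OP/op10_password_test/password.py | is_different_from_old_password
-- ===== SOURCE A (Python) =====
-- import math
--
-- def is_different_from_old_password(old_password: str, new_password: str) -> bool:
--     """
--     Check if the new password is different enough from the old password.
--
--     The overlap between the new password and old password should be less than 50%.
--     The check for overlap is case-insensitive.
--     The overlap is also checked for the reversed version of the new password.
--
--     :param old_password: The old password
--     :param new_password: The new password
--     :return: True if the new password is different enough, False otherwise
--     """
--     old_pass = old_password.lower()
--     new_pass = new_password.lower()
--     overlap = math.ceil(len(new_pass) / 2)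
--     x = 0
--     while overlap <= len(new_pass):
--         if new_pass[x:overlap] in old_pass or new_pass[x:overlap] in old_pass[::-1]:
--             return False
--         else:
--             x += 1
--             overlap += 1
--     return True
-- ===== SOURCE B (Python) =====
-- def _lcs_len(a: str, b: str) -> int:
--     """Length of the longest common substring of a and b (classic DP, rolling row)."""
--     best = 0
--     prev = [0] * (len(b) + 1)
--     for ca in a:
--         cur = [0] * (len(b) + 1)
--         for j, cb in enumerate(b):
--             if ca == cb:
--                 cur[j + 1] = prev[j] + 1
--                 if cur[j + 1] > best:
--                     best = cur[j + 1]
--         prev = cur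
--     return best
--
--
-- def is_different_from_old_password(old_password: str, new_password: str) -> bool:
--     # A rejects iff some half-length window of new (or its reverse) occurs in old,
--     # i.e. iff new and old (or reversed new and old) share a common substring of
--     # length >= ceil(len(new)/2).  Compute that via longest-common-substring DP.
--     old = old_password.lower()
--     new = new_password.lower()
--     k = (len(new) + 1) // 2
--     return _lcs_len(new, old) < k and _lcs_len(new[::-1], old) < k
-- ===== Notes on version B (the rewrite author's own statement) =====
-- stated objective: alternative
-- what changed: A slides each half-length window of new over old (a substring search per window); B never enumerates windows: it computes the longest-common-substring length of (new, old) and of (reversed new, old) by the classic dynamic-programming table with a rolling row, and compares both against ceil(len(new)/2).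
import Mathlib
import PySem

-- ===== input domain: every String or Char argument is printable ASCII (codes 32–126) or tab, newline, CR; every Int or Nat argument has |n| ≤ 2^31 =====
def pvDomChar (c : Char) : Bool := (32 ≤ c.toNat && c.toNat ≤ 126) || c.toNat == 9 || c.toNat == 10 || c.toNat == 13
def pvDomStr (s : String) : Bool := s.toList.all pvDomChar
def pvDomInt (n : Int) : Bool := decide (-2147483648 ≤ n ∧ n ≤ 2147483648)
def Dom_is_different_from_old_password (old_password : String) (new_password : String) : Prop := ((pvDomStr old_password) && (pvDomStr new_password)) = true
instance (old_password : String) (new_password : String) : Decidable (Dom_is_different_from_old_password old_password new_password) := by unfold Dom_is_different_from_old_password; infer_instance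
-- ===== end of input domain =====

-- B replaces A's per-window substring scans by longest-common-substring dynamic programming:
-- it compares the LCS length of (new, old) and (reversed new, old) against ceil(n/2)
-- (objective: alternative algorithm; no wall-clock speed is claimed).

-- ===== PORT A =====
-- A's while loop: x and overlap both step by 1 while overlap <= len(new_pass).
-- math.ceil(len(new_pass) / 2) is ported exactly as (n + 1) / 2 on Nat (exact: float n/2 and
-- its ceil are exact for every string length reachable here).
def pvALoop (newL oldL : List Char) (x overlap : Nat) : Bool :=
  if overlap ≤ newL.length then
    if PySem.Chars.isIn (PySem.List.slice newL (some (x : Int)) (some (overlap : Int))) oldL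
       || PySem.Chars.isIn (PySem.List.slice newL (some (x : Int)) (some (overlap : Int))) oldL.reverse then
      false
    else
      pvALoop newL oldL (x + 1) (overlap + 1)
  else
    true
termination_by newL.length + 1 - overlap

def is_different_from_old_password (old_password : String) (new_password : String) : Bool :=
  let oldL := PySem.Chars.lower old_password.toList
  let newL := PySem.Chars.lower new_password.toList
  pvALoop newL oldL 0 ((newL.length + 1) / 2)

-- ===== PORT B =====
-- _lcs_len's outer 'for ca in a' loop; prev is the previous DP row (length len(b)+1).
-- cur[0] = 0 and cur[j+1] = prev[j]+1 if ca == b[j] else 0 is the zipWith below; Python's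
-- 'if cur[j+1] > best: best = cur[j+1]' (run only on equal chars) is the running max over
-- the whole row — exact, since the cells it skips are 0 ≤ best.
def pvLcsLoop (b : List Char) : List Char → List Nat → Nat → Nat
  | [], _, best => best
  | ca :: rest, prev, best =>
      let cur := 0 :: List.zipWith (fun cb pj => if ca == cb then pj + 1 else 0) b prev
      pvLcsLoop b rest cur (cur.foldl Nat.max best)

-- _lcs_len(a, b): prev starts as [0]*(len(b)+1), best as 0
def pvLcs (a b : List Char) : Nat := pvLcsLoop b a (List.replicate (b.length + 1) 0) 0

def is_different_from_old_password_alt (old_password : String) (new_password : String) : Bool :=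
  let oldL := PySem.Chars.lower old_password.toList
  let newL := PySem.Chars.lower new_password.toList
  -- k = (len(new) + 1) // 2 : Python floor division of nonnegative ints = Nat division
  let k := (newL.length + 1) / 2
  decide (pvLcs newL oldL < k) && decide (pvLcs newL.reverse oldL < k)

-- ===== PRECONDITION & SPEC =====
def Spec_is_different_from_old_password (old_password : String) (new_password : String) (out : Bool) : Prop := out = is_different_from_old_password_alt old_password new_password
instance (old_password : String) (new_password : String) (out : Bool) : Decidable (Spec_is_different_from_old_password old_password new_password out) := by unfold Spec_is_different_from_old_password; infer_instance

-- ===== CLAIM (what is proved, stated in full; the proofs are below) =====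
def Claim_equal_is_different_from_old_password : Prop := ∀ (old_password : String) (new_password : String), Dom_is_different_from_old_password old_password new_password → Spec_is_different_from_old_password old_password new_password (is_different_from_old_password old_password new_password)

-- ===== LEMMAS AND PROOFS =====

-- the per-window test A performs, as a Prop
def pvCheck (oldL w : List Char) : Prop := w <:+: oldL ∨ w <:+: oldL.reverse

lemma pv_take_drop_infix (l : List Char) (a b : Nat) : (l.drop a).take b <:+: l :=
  ((l.drop a).take_prefix b).isInfix.trans (l.drop_suffix a).isInfix

-- characterization of A's while-loop
lemma pv_aLoop_iff (newL oldL : List Char) (k : Nat) :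
    ∀ (f x : Nat), newL.length + 1 - (x + k) ≤ f →
    (pvALoop newL oldL x (x + k) = true ↔
      ∀ j, x ≤ j → j + k ≤ newL.length → ¬ pvCheck oldL ((newL.drop j).take k)) := by
  intro f
  induction f with
  | zero =>
    intro x hf
    rw [pvALoop]
    have hov : ¬ (x + k ≤ newL.length) := by omega
    simp only [hov, if_false]
    constructor
    · intro _ j hxj hjk; omega
    · intro _; trivial
  | succ f ih =>
    intro x hf
    rw [pvALoop]
    by_cases hov : x + k ≤ newL.length
    · simp only [hov, if_true]
      have hsl : PySem.List.slice newL (some ((x : Nat) : Int)) (some (((x + k : Nat)) : Int))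
          = (newL.drop x).take k := by
        rw [show (((x + k : Nat)) : Int) = ((x : Nat) : Int) + ((k : Nat) : Int) from by push_cast; ring,
            PySem.List.slice_natCast_add]
      by_cases hc : pvCheck oldL ((newL.drop x).take k)
      · have : (PySem.Chars.isIn (PySem.List.slice newL (some ((x:Nat):Int)) (some (((x+k:Nat)):Int))) oldL
            || PySem.Chars.isIn (PySem.List.slice newL (some ((x:Nat):Int)) (some (((x+k:Nat)):Int))) oldL.reverse) = true := by
          rw [hsl]
          rcases hc with h | h
          · simp [(PySem.Chars.isIn_iff_infix _ _).mpr h]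
          · simp [(PySem.Chars.isIn_iff_infix _ _).mpr h]
        simp only [this, if_true]
        constructor
        · intro hfalse; cases hfalse
        · intro hall; exact absurd hc (hall x (le_refl x) hov)
      · have : (PySem.Chars.isIn (PySem.List.slice newL (some ((x:Nat):Int)) (some (((x+k:Nat)):Int))) oldL
            || PySem.Chars.isIn (PySem.List.slice newL (some ((x:Nat):Int)) (some (((x+k:Nat)):Int))) oldL.reverse) = false := by
          rw [hsl]
          have h1 : ¬ ((newL.drop x).take k <:+: oldL) := fun h => hc (Or.inl h)
          have h2 : ¬ ((newL.drop x).take k <:+: oldL.reverse) := fun h => hc (Or.inr h)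
          simp [(PySem.Chars.isIn_eq_false_iff _ _).mpr h1, (PySem.Chars.isIn_eq_false_iff _ _).mpr h2]
        simp only [this, Bool.false_eq_true, if_false]
        have hrec := ih (x + 1) (by omega)
        rw [show x + 1 + k = x + k + 1 from by ring] at hrec
        rw [hrec]
        constructor
        · intro hall j hxj hjk
          rcases Nat.eq_or_lt_of_le hxj with rfl | hlt
          · exact hc
          · exact hall j hlt hjk
        · intro hall j hxj hjk
          exact hall j (by omega) hjk
    · simp only [hov, if_false]
      constructor
      · intro _ j hxj hjk; omega
      · intro _; trivial

-- longest common prefix length (spec-side mirror of the DP recurrence)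
def pvLcp : List Char → List Char → Nat
  | c :: x, d :: y => if c = d then pvLcp x y + 1 else 0
  | _, _ => 0

-- longest common suffix length
def pvCsuf (u v : List Char) : Nat := pvLcp u.reverse v.reverse

-- the DP row after processing prefix s of a
def pvRow (b s : List Char) : List Nat :=
  (List.range (b.length + 1)).map (fun j => pvCsuf s (b.take j))

lemma pvLcp_nil_left (y : List Char) : pvLcp [] y = 0 := by cases y <;> rfl

lemma pvLcp_nil_right (x : List Char) : pvLcp x [] = 0 := by cases x <;> rfl

lemma pvLcp_ge_iff (x : List Char) : ∀ (y : List Char) (k : Nat),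
    k ≤ pvLcp x y ↔ k ≤ x.length ∧ k ≤ y.length ∧ x.take k = y.take k := by
  induction x with
  | nil =>
    intro y k
    rw [pvLcp_nil_left]
    constructor
    · intro h
      have : k = 0 := by omega
      subst this; simp
    · intro ⟨h1, _, _⟩; simpa using h1
  | cons c x ih =>
    intro y k
    cases y with
    | nil =>
      rw [pvLcp_nil_right]
      constructor
      · intro h
        have : k = 0 := by omega
        subst this; simp
      · intro ⟨_, h2, _⟩; simpa using h2
    | cons d y =>
      cases k with
      | zero => simp
      | succ k =>
        show k + 1 ≤ (if c = d then pvLcp x y + 1 else 0) ↔ _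
        by_cases hcd : c = d
        · subst hcd
          rw [if_pos rfl]
          have hih := ih y k
          simp only [List.length_cons, List.take_succ_cons, List.cons.injEq, true_and]
          constructor
          · intro h
            have h' := hih.mp (by omega)
            exact ⟨by omega, by omega, h'.2.2⟩
          · rintro ⟨h1, h2, h3⟩
            have := hih.mpr ⟨by omega, by omega, h3⟩
            omega
        · rw [if_neg hcd]
          simp only [List.length_cons, List.take_succ_cons, List.cons.injEq]
          constructor
          · intro h; omega
          · rintro ⟨_, _, h3, _⟩; exact absurd h3 hcd

lemma pvCsuf_ge_iff (u v : List Char) (k : Nat) :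
    k ≤ pvCsuf u v ↔ k ≤ u.length ∧ k ≤ v.length ∧ u.reverse.take k = v.reverse.take k := by
  rw [pvCsuf, pvLcp_ge_iff]
  simp

lemma pvCsuf_nil_right (u : List Char) : pvCsuf u [] = 0 := by
  simp [pvCsuf, pvLcp_nil_right]

lemma pvCsuf_snoc (s t : List Char) (c d : Char) :
    pvCsuf (s ++ [c]) (t ++ [d]) = if c = d then pvCsuf s t + 1 else 0 := by
  simp only [pvCsuf, List.reverse_append, List.reverse_cons, List.reverse_nil, List.nil_append,
    List.cons_append]
  rfl

lemma pvRow_nil (b : List Char) : pvRow b [] = List.replicate (b.length + 1) 0 := by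
  rw [List.eq_replicate_iff]
  constructor
  · simp [pvRow]
  · intro v hv
    obtain ⟨j, _, rfl⟩ := List.mem_map.mp hv
    simp [pvCsuf, pvLcp_nil_left]

lemma pvRow_snoc (b s : List Char) (ca : Char) :
    pvRow b (s ++ [ca]) =
      0 :: List.zipWith (fun cb pj => if ca == cb then pj + 1 else 0) b (pvRow b s) := by
  apply List.ext_getElem
  · simp [pvRow]
  · intro i h1 h2
    cases i with
    | zero =>
      simp [pvRow, pvCsuf_nil_right]
    | succ j =>
      have hj : j < b.length := by
        simpa [pvRow] using h2
      have hrow : (pvRow b s)[j]'(by simp [pvRow]; omega) = pvCsuf s (b.take j) := by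
        simp [pvRow]
      simp only [List.getElem_cons_succ, List.getElem_zipWith, hrow]
      have hL : (pvRow b (s ++ [ca]))[j + 1]'h1 = pvCsuf (s ++ [ca]) (b.take (j + 1)) := by
        simp [pvRow]
      rw [hL, List.take_add_one, List.getElem?_eq_getElem hj]
      simp only [Option.toList_some]
      rw [pvCsuf_snoc]
      simp [beq_iff_eq]

lemma pv_le_foldl_max_iff (l : List Nat) (a k : Nat) :
    k ≤ l.foldl Nat.max a ↔ k ≤ a ∨ ∃ v ∈ l, k ≤ v := by
  constructor
  · intro h
    rcases PySem.List.foldl_max_mem l a with he | hm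
    · left; rw [← he]; exact h
    · right; exact ⟨_, hm, h⟩
  · intro h
    rcases h with h | ⟨v, hv, hkv⟩
    · exact le_trans h (PySem.List.le_foldl_max l a).1
    · exact le_trans hkv ((PySem.List.le_foldl_max l a).2 v hv)

lemma pvLoop_ge_iff (b : List Char) : ∀ (rest s : List Char) (best k : Nat),
    k ≤ pvLcsLoop b rest (pvRow b s) best ↔
      k ≤ best ∨ ∃ i j, 1 ≤ i ∧ i ≤ rest.length ∧ j ≤ b.length ∧
        k ≤ pvCsuf (s ++ rest.take i) (b.take j) := by
  intro rest
  induction rest with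
  | nil =>
    intro s best k
    simp only [pvLcsLoop, List.length_nil]
    constructor
    · intro h; exact Or.inl h
    · rintro (h | ⟨i, j, h1, h2, _, _⟩)
      · exact h
      · omega
  | cons ca rest ih =>
    intro s best k
    have hcur : (0 :: List.zipWith (fun cb pj => if ca == cb then pj + 1 else 0) b (pvRow b s))
        = pvRow b (s ++ [ca]) := (pvRow_snoc b s ca).symm
    show k ≤ pvLcsLoop b rest
        (0 :: List.zipWith (fun cb pj => if ca == cb then pj + 1 else 0) b (pvRow b s))
        ((0 :: List.zipWith (fun cb pj => if ca == cb then pj + 1 else 0) b (pvRow b s)).foldl Nat.max best) ↔ _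
    rw [hcur, ih (s ++ [ca]) _ k, pv_le_foldl_max_iff]
    have hmem : (∃ v ∈ pvRow b (s ++ [ca]), k ≤ v) ↔
        ∃ j, j ≤ b.length ∧ k ≤ pvCsuf (s ++ [ca]) (b.take j) := by
      constructor
      · rintro ⟨v, hv, hkv⟩
        obtain ⟨j, hj, rfl⟩ := List.mem_map.mp hv
        exact ⟨j, by simpa using List.mem_range.mp hj, hkv⟩
      · rintro ⟨j, hj, hk⟩
        exact ⟨_, List.mem_map.mpr ⟨j, List.mem_range.mpr (by omega), rfl⟩, hk⟩
    rw [hmem]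
    constructor
    · rintro ((hb | ⟨j, hj, hk⟩) | ⟨i, j, hi1, hi2, hj, hk⟩)
      · exact Or.inl hb
      · exact Or.inr ⟨1, j, le_refl 1, by simp, hj, by simpa using hk⟩
      · refine Or.inr ⟨i + 1, j, by omega, by simp; omega, hj, ?_⟩
        rw [List.take_succ_cons, show s ++ ca :: rest.take i = (s ++ [ca]) ++ rest.take i from by simp]
        exact hk
    · rintro (hb | ⟨i, j, hi1, hi2, hj, hk⟩)
      · exact Or.inl (Or.inl hb)
      · cases i with
        | zero => omega
        | succ i =>
          cases i with
          | zero =>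
            refine Or.inl (Or.inr ⟨j, hj, ?_⟩)
            simpa using hk
          | succ i =>
            refine Or.inr ⟨i + 1, j, by omega, by simp at hi2 ⊢; omega, hj, ?_⟩
            rw [List.take_succ_cons, show s ++ ca :: rest.take (i+1) = (s ++ [ca]) ++ rest.take (i+1) from by simp] at hk
            exact hk

lemma pv_take_len (x t : List Char) : (x ++ t).take x.length = x := by
  rw [List.take_append, List.take_length, Nat.sub_self, List.take_zero, List.append_nil]

lemma pv_drop_len (s x : List Char) : (s ++ x).drop s.length = x := by
  rw [List.drop_append, List.drop_length, Nat.sub_self, List.drop_zero, List.nil_append]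

-- infix of a reverse is a reversed infix
lemma pv_infix_rev (w a : List Char) : w <:+: a.reverse ↔ w.reverse <:+: a := by
  simpa using (List.reverse_infix (l₁ := w.reverse) (l₂ := a))

-- the DP result reaches k exactly when a and b share a substring of length k
lemma pvLcs_ge_iff (a b : List Char) (k : Nat) :
    k ≤ pvLcs a b ↔ ∃ w : List Char, w.length = k ∧ w <:+: a ∧ w <:+: b := by
  rw [pvLcs, ← pvRow_nil b, pvLoop_ge_iff b a [] 0 k]
  simp only [List.nil_append, Nat.le_zero]
  constructor
  · rintro (rfl | ⟨i, j, _, _, _, hk⟩)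
    · exact ⟨[], rfl, List.nil_infix, List.nil_infix⟩
    · obtain ⟨hu, hv, heq⟩ := (pvCsuf_ge_iff _ _ k).mp hk
      refine ⟨((a.take i).reverse.take k).reverse, ?_, ?_, ?_⟩
      · simp only [List.length_reverse, List.length_take]
        simp only [List.length_take] at hu
        omega
      · have hpre : ((a.take i).reverse.take k).reverse.reverse <+: (a.take i).reverse := by
          simpa using (a.take i).reverse.take_prefix k
        have hsuf : ((a.take i).reverse.take k).reverse <:+ a.take i := by
          rw [← List.reverse_prefix]; simpa using hpre
        exact hsuf.isInfix.trans (a.take_prefix i).isInfix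
      · have hpre : ((b.take j).reverse.take k).reverse.reverse <+: (b.take j).reverse := by
          simpa using (b.take j).reverse.take_prefix k
        have hsuf : ((b.take j).reverse.take k).reverse <:+ b.take j := by
          rw [← List.reverse_prefix]; simpa using hpre
        rw [heq]
        exact hsuf.isInfix.trans (b.take_prefix j).isInfix
  · rintro ⟨w, hlen, hwa, hwb⟩
    cases k with
    | zero => exact Or.inl rfl
    | succ k' =>
      obtain ⟨sa, ta, ha⟩ := hwa
      obtain ⟨sb, tb, hb⟩ := hwb
      have hla := congrArg List.length ha
      have hlb := congrArg List.length hb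
      simp only [List.length_append] at hla hlb
      have hta : a.take (sa.length + (k' + 1)) = sa ++ w := by
        rw [← ha, show sa.length + (k' + 1) = (sa ++ w).length from by simp [hlen]]
        exact pv_take_len (sa ++ w) ta
      have htb : b.take (sb.length + (k' + 1)) = sb ++ w := by
        rw [← hb, show sb.length + (k' + 1) = (sb ++ w).length from by simp [hlen]]
        exact pv_take_len (sb ++ w) tb
      refine Or.inr ⟨sa.length + (k' + 1), sb.length + (k' + 1), by omega, by omega, by omega, ?_⟩
      rw [pvCsuf_ge_iff]
      refine ⟨?_, ?_, ?_⟩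
      · rw [hta]; simp only [List.length_append, hlen]; omega
      · rw [htb]; simp only [List.length_append, hlen]; omega
      · rw [hta, htb, List.reverse_append, List.reverse_append,
            show k' + 1 = w.reverse.length from by simp [hlen],
            pv_take_len w.reverse sa.reverse, pv_take_len w.reverse sb.reverse]

-- length-k infixes of a are exactly its length-k windows
lemma pv_window_iff (a b : List Char) (k : Nat) :
    (∃ w : List Char, w.length = k ∧ w <:+: a ∧ w <:+: b) ↔
      (∃ j, j + k ≤ a.length ∧ (a.drop j).take k <:+: b) := by
  constructor
  · rintro ⟨w, hlen, ⟨s, t, hst⟩, hP⟩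
    have hls := congrArg List.length hst
    simp only [List.length_append] at hls
    refine ⟨s.length, by omega, ?_⟩
    have hdrop : a.drop s.length = w ++ t := by
      rw [← hst, List.append_assoc]
      exact pv_drop_len s (w ++ t)
    rw [hdrop, ← hlen, pv_take_len w t]
    exact hP
  · rintro ⟨j, hjk, hP⟩
    refine ⟨(a.drop j).take k, ?_, pv_take_drop_infix a j k, hP⟩
    simp only [List.length_take, List.length_drop]
    omega

-- reversing the witness: w common to new.reverse and old ↔ some infix of new has its reverse in old
lemma pv_rev_witness_iff (a b : List Char) (k : Nat) :
    (∃ w : List Char, w.length = k ∧ w <:+: a.reverse ∧ w <:+: b) ↔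
      (∃ w : List Char, w.length = k ∧ w <:+: a ∧ w <:+: b.reverse) := by
  constructor
  · rintro ⟨w, hlen, hwa, hwb⟩
    exact ⟨w.reverse, by simpa using hlen, (pv_infix_rev w a).mp hwa,
      (pv_infix_rev w.reverse b).mpr (by simpa using hwb)⟩
  · rintro ⟨w, hlen, hwa, hwb⟩
    exact ⟨w.reverse, by simpa using hlen, (pv_infix_rev w.reverse a).mpr (by simpa using hwa),
      (pv_infix_rev w b).mp hwb⟩

-- ===== VERDICT (by name: the statement is the Claim_ definition above) =====
theorem is_different_from_old_password_spec : Claim_equal_is_different_from_old_password := by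
  intro old_password new_password _
  unfold Spec_is_different_from_old_password
  unfold is_different_from_old_password is_different_from_old_password_alt
  simp only []
  set oldL := PySem.Chars.lower old_password.toList with holdL
  set newL := PySem.Chars.lower new_password.toList with hnewL
  set k := (newL.length + 1) / 2 with hk
  rw [Bool.eq_iff_iff]
  have hA := pv_aLoop_iff newL oldL k (newL.length + 1) 0 (by omega)
  rw [Nat.zero_add] at hA
  rw [hA, Bool.and_eq_true, decide_eq_true_eq, decide_eq_true_eq, ← Nat.not_le, ← Nat.not_le,
      pvLcs_ge_iff, pvLcs_ge_iff, pv_rev_witness_iff, pv_window_iff newL oldL k,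
      pv_window_iff newL oldL.reverse k]
  constructor
  · intro hall
    constructor
    · rintro ⟨j, hjk, hw⟩
      exact hall j (Nat.zero_le j) hjk (Or.inl hw)
    · rintro ⟨j, hjk, hw⟩
      exact hall j (Nat.zero_le j) hjk (Or.inr hw)
  · rintro ⟨h1, h2⟩ j _ hjk hc
    rcases hc with h | h
    · exact h1 ⟨j, hjk, h⟩
    · exact h2 ⟨j, hjk, h⟩
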